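-- pv_equiv track=rewrite | github.com/EfajTahamidRifat/OTP | bot.py | detect_service
-- ===== SOURCE A (Python) =====
-- def detect_service(text: str):
--     t = (text or "").lower()
--     services = {
--         "whatsapp":"WhatsApp","facebook":"Facebook","telegram":"Telegram",
--         "google":"Google","instagram":"Instagram","tiktok":"TikTok","apple":"Apple",
--         "1xbet":"1xBet","melbet":"Melbet","exness":"Exness","wildberries":"Wildberries",
--         "betwinner":"Betwinner","netflix":"Netflix"
--     }
--     for k in sorted(services.keys(), key=len, reverse=True):
--         if k in t:
--             return services[k]
--     return "Service"
-- ===== SOURCE B (Python) =====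
-- def detect_service(text: str):
--     t = (text or "").lower()
--     services = {
--         "whatsapp":"WhatsApp","facebook":"Facebook","telegram":"Telegram",
--         "google":"Google","instagram":"Instagram","tiktok":"TikTok","apple":"Apple",
--         "1xbet":"1xBet","melbet":"Melbet","exness":"Exness","wildberries":"Wildberries",
--         "betwinner":"Betwinner","netflix":"Netflix"
--     }
--     best = None
--     for k, v in services.items():
--         if best is None:
--             if k in t:
--                 best = (k, v)
--         elif k in t and len(k) > len(best[0]):
--             best = (k, v)
--     return best[1] if best is not None else "Service"
-- ===== Notes on version B (the rewrite author's own statement) =====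
-- stated objective: simpler
-- what changed: B drops the length-sort of the keys and instead makes one pass over the dict items tracking the longest matching key so far (strict comparison keeps insertion-order ties exactly like the stable sort), falling back to the default label when no key matches.
import Mathlib
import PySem

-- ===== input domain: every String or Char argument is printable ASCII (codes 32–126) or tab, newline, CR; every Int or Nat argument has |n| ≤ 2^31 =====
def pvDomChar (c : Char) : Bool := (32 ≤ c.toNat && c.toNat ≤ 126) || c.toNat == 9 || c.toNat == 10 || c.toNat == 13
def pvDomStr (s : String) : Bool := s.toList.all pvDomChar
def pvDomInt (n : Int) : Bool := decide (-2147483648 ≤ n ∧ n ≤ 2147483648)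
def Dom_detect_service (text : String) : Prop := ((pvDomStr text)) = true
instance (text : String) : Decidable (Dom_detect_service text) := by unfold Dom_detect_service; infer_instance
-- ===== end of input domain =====

-- B replaces A's 'sort the keys by length descending, return the first substring hit' by a single
-- pass over the dict items tracking the longest matching key (strict > keeps insertion-order ties).

-- ===== PORT A =====
-- the literal services dict of A (and of B)
def pvServices : PySem.Dict String String :=
  PySem.Dict.ofList [("whatsapp","WhatsApp"),("facebook","Facebook"),("telegram","Telegram"),
    ("google","Google"),("instagram","Instagram"),("tiktok","TikTok"),("apple","Apple"),
    ("1xbet","1xBet"),("melbet","Melbet"),("exness","Exness"),("wildberries","Wildberries"),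
    ("betwinner","Betwinner"),("netflix","Netflix")]

-- A's for-loop: first key (in the length-sorted order) contained in t returns services[k], else "Service"
def pvLoopA (t : String) : List String → String
  | [] => "Service"
  | k :: ks => if PySem.Str.isIn k t then PySem.Dict.getD pvServices k "" else pvLoopA t ks

def detect_service (text : String) : String :=
  pvLoopA (PySem.Str.lower (if text == "" then "" else text))
    (PySem.List.sorted (PySem.Dict.keys pvServices) (fun k => PySem.Str.len k) true)

-- ===== PORT B =====
-- B's loop body: keep the previous best unless this key matches and is strictly longer
def pvStepB (t : String) (best : Option (String × String)) (kv : String × String) :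
    Option (String × String) :=
  match best with
  | none => if PySem.Str.isIn kv.1 t then some kv else none
  | some b =>
    if PySem.Str.isIn kv.1 t && decide (PySem.Str.len b.1 < PySem.Str.len kv.1)
    then some kv else some b

def detect_service_alt (text : String) : String :=
  match (PySem.Dict.items pvServices).foldl
      (pvStepB (PySem.Str.lower (if text == "" then "" else text)))
      (none : Option (String × String)) with
  | some b => b.2
  | none => "Service"

-- ===== PRECONDITION & SPEC =====
def Spec_detect_service (text : String) (out : String) : Prop := out = detect_service_alt text
instance (text : String) (out : String) : Decidable (Spec_detect_service text out) := by unfold Spec_detect_service; infer_instance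

-- ===== CLAIM (what is proved, stated in full; the proofs are below) =====
def Claim_equal_detect_service : Prop := ∀ (text : String), Dom_detect_service text → Spec_detect_service text (detect_service text)

-- ===== LEMMAS AND PROOFS =====
-- A's chain of tests, abstracted over the 13 membership booleans (bi = "is the i-th inserted key in t"),
-- in the length-descending stable-sorted order A visits them
def pvChainA (b0 b1 b2 b3 b4 b5 b6 b7 b8 b9 b10 b11 b12 : Bool) : String :=
  if b10 = true then "Wildberries" else if b4 = true then "Instagram" else if b11 = true then "Betwinner" else if b0 = true then "WhatsApp" else if b1 = true then "Facebook" else if b2 = true then "Telegram" else if b12 = true then "Netflix" else if b3 = true then "Google" else if b5 = true then "TikTok" else if b8 = true then "Melbet" else if b9 = true then "Exness" else if b6 = true then "Apple" else if b7 = true then "1xBet" else "Service"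

-- B's fold, abstracted over the same 13 booleans, in insertion order
def pvFoldB (b0 b1 b2 b3 b4 b5 b6 b7 b8 b9 b10 b11 b12 : Bool) : String :=
  match ([(b0, ("whatsapp", "WhatsApp")), (b1, ("facebook", "Facebook")), (b2, ("telegram", "Telegram")), (b3, ("google", "Google")), (b4, ("instagram", "Instagram")), (b5, ("tiktok", "TikTok")), (b6, ("apple", "Apple")), (b7, ("1xbet", "1xBet")), (b8, ("melbet", "Melbet")), (b9, ("exness", "Exness")), (b10, ("wildberries", "Wildberries")), (b11, ("betwinner", "Betwinner")), (b12, ("netflix", "Netflix"))] : List (Bool × String × String)).foldl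
    (fun best bkv =>
      match best with
      | none => if bkv.1 then some bkv.2 else none
      | some b =>
        if bkv.1 && decide (PySem.Str.len b.1 < PySem.Str.len bkv.2.1)
        then some bkv.2 else some b)
    (none : Option (String × String)) with
  | some b => b.2
  | none => "Service"

-- the combinatorial core: first hit in length-descending stable order = longest hit kept by a
-- strict-improvement scan in insertion order (all 2^13 membership patterns)
theorem pvKey : ∀ (b0 b1 b2 b3 b4 b5 b6 b7 b8 b9 b10 b11 b12 : Bool), pvChainA b0 b1 b2 b3 b4 b5 b6 b7 b8 b9 b10 b11 b12 = pvFoldB b0 b1 b2 b3 b4 b5 b6 b7 b8 b9 b10 b11 b12 := by decide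

theorem pvA_eq (t : String) : pvLoopA t ["wildberries", "instagram", "betwinner", "whatsapp", "facebook", "telegram", "netflix", "google", "tiktok", "melbet", "exness", "apple", "1xbet"] = pvChainA (PySem.Str.isIn "whatsapp" t) (PySem.Str.isIn "facebook" t) (PySem.Str.isIn "telegram" t) (PySem.Str.isIn "google" t) (PySem.Str.isIn "instagram" t) (PySem.Str.isIn "tiktok" t) (PySem.Str.isIn "apple" t) (PySem.Str.isIn "1xbet" t) (PySem.Str.isIn "melbet" t) (PySem.Str.isIn "exness" t) (PySem.Str.isIn "wildberries" t) (PySem.Str.isIn "betwinner" t) (PySem.Str.isIn "netflix" t) := by rfl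

theorem pvSorted : PySem.List.sorted (PySem.Dict.keys pvServices) (fun k => PySem.Str.len k) true = ["wildberries", "instagram", "betwinner", "whatsapp", "facebook", "telegram", "netflix", "google", "tiktok", "melbet", "exness", "apple", "1xbet"] := by decide

theorem pvB_eq (t : String) : (match (PySem.Dict.items pvServices).foldl (pvStepB t) (none : Option (String × String)) with
  | some b => b.2
  | none => "Service") = pvFoldB (PySem.Str.isIn "whatsapp" t) (PySem.Str.isIn "facebook" t) (PySem.Str.isIn "telegram" t) (PySem.Str.isIn "google" t) (PySem.Str.isIn "instagram" t) (PySem.Str.isIn "tiktok" t) (PySem.Str.isIn "apple" t) (PySem.Str.isIn "1xbet" t) (PySem.Str.isIn "melbet" t) (PySem.Str.isIn "exness" t) (PySem.Str.isIn "wildberries" t) (PySem.Str.isIn "betwinner" t) (PySem.Str.isIn "netflix" t) := by rfl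

theorem detect_service_eq (text : String) : detect_service text = detect_service_alt text := by
  unfold detect_service detect_service_alt
  rw [pvSorted]
  exact (pvA_eq _).trans ((pvKey _ _ _ _ _ _ _ _ _ _ _ _ _).trans (pvB_eq _).symm)

-- ===== VERDICT (by name: the statement is the Claim_ definition above) =====
theorem detect_service_spec : Claim_equal_detect_service := by
  intro text _
  unfold Spec_detect_service
  exact detect_service_eq text
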